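-- pv_equiv track=rewrite | github.com/Kacper2901/Algorithms | basic_problems_on_array/minimum_increment.py | minimum_increment
-- ===== SOURCE A (Python) =====
-- def minimum_increment(numbers, k):
--     """Finds the number of operations needed to make all elements of array equal.
--
--     Args:
--         numbers (List of int): List of integers
--         k (int): Increment value
--
--     Returns:
--         Int: how many increments has been done; -1 if it's not possible
--     """
--     length = len(numbers)
--     max = float("-inf")
--     for i in range(length):
--         if numbers[i] > max:
--             max = numbers[i] # Search for max, to equal other numbers
--
--     result = 0
--     mod = max % k
--     for i in range(length):
--         if numbers[i] % k != mod: # Modulo has to be equal because we can only add k (no more no less)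
--             return -1
--         result += (max - numbers[i]) // k # How much do we need to get max, end then how many incremets it will be
--
--     return result
-- ===== SOURCE B (Python) =====
-- def minimum_increment(numbers, k):
--     """Minimum number of +k increments to equalize the array; -1 if impossible.
--
--     Single streaming pass: keep a running max m and running increment total;
--     when a larger element arrives, retroactively add (x-m)//k for each of the
--     `seen` earlier elements (their target just rose by x-m) and update m.
--     """
--     if not numbers:
--         return 0
--     m = numbers[0]
--     r = m % k
--     total = 0
--     seen = 0
--     for x in numbers:
--         if x % k != r:
--             return -1
--         if x > m:
--             total += seen * ((x - m) // k)
--             m = x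
--         else:
--             total += (m - x) // k
--         seen += 1
--     return total
-- ===== Notes on version B (the rewrite author's own statement) =====
-- stated objective: alternative
-- what changed: B is a single streaming pass that never precomputes the maximum: it keeps a running max and running increment total and, when a larger element arrives, retroactively adds (x-m)//k per already-seen element, replacing A's two-pass max-then-accumulate scheme.
import Mathlib
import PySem

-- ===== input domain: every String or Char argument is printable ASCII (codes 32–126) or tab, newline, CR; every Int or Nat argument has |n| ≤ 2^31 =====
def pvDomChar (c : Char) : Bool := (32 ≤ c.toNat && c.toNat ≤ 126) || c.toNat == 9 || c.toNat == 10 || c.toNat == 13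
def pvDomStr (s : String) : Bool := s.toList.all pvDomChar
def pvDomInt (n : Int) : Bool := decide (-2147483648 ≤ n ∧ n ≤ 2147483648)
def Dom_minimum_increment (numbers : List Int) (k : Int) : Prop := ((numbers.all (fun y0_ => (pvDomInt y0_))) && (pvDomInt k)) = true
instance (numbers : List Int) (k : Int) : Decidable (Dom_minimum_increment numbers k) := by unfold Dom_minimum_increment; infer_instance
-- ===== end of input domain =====

-- B is a single streaming pass (running max, retroactive adjustment of the running total
-- when a new max appears) instead of A's two passes; equivalence proved for k ≠ 0
-- (A raises ZeroDivisionError at k = 0).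

-- ===== PORT A =====
-- A's first loop: running maximum starting from float("-inf"), modeled as `none`
-- (x > -inf is always true; when the list is empty the second loop runs zero times
-- and A returns result = 0, never touching the -inf value).
def pvMaxLoopA : List Int → Option Int → Option Int
  | [], m => m
  | x :: xs, m =>
      pvMaxLoopA xs (if (match m with | none => true | some v => decide (v < x)) then some x else m)

-- A's second loop: early return -1 on residue mismatch, else accumulate (max - x) // k.
def pvSumLoopA (mx md k : Int) : List Int → Int → Int
  | [], result => result
  | x :: xs, result =>
      if PySem.Int.mod x k ≠ md then -1
      else pvSumLoopA mx md k xs (result + PySem.Int.floordiv (mx - x) k)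

def minimum_increment (numbers : List Int) (k : Int) : Int :=
  match pvMaxLoopA numbers none with
  | none => 0                      -- empty input: second loop body never runs, result stays 0
  | some mx => pvSumLoopA mx (PySem.Int.mod mx k) k numbers 0

-- ===== PORT B =====
-- B's single loop: state (m = running max, total = increments so far, seen = elements so far);
-- a new max x retroactively adds seen * ((x - m) // k) to total.
def pvLoopB (r k : Int) : List Int → Int → Int → Int → Int
  | [], _, total, _ => total
  | x :: xs, m, total, seen =>
      if PySem.Int.mod x k ≠ r then -1
      else if m < x then pvLoopB r k xs x (total + seen * PySem.Int.floordiv (x - m) k) (seen + 1)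
      else pvLoopB r k xs m (total + PySem.Int.floordiv (m - x) k) (seen + 1)

def minimum_increment_alt (numbers : List Int) (k : Int) : Int :=
  match numbers with
  | [] => 0
  | h :: _ => pvLoopB (PySem.Int.mod h k) k numbers h 0 0

-- ===== PRECONDITION & SPEC =====
-- Pre_ excludes exactly k = 0, where Python A raises ZeroDivisionError.
def Pre_minimum_increment (numbers : List Int) (k : Int) : Prop := k ≠ 0
instance (numbers : List Int) (k : Int) : Decidable (Pre_minimum_increment numbers k) := by unfold Pre_minimum_increment; infer_instance
def pvWitness_minimum_increment : List Int × Int := ([1, 4, 7], 3)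

def Spec_minimum_increment (numbers : List Int) (k : Int) (out : Int) : Prop := out = minimum_increment_alt numbers k
instance (numbers : List Int) (k : Int) (out : Int) : Decidable (Spec_minimum_increment numbers k out) := by unfold Spec_minimum_increment; infer_instance

-- ===== CLAIM (what is proved, stated in full; the proofs are below) =====
def Claim_equal_minimum_increment : Prop := ∀ (numbers : List Int) (k : Int), Dom_minimum_increment numbers k → Pre_minimum_increment numbers k → Spec_minimum_increment numbers k (minimum_increment numbers k)

-- ===== LEMMAS AND PROOFS =====

theorem dvd_sub_of_fmod_eq {k x m : Int} (h : x.fmod k = m.fmod k) : k ∣ (m - x) := by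
  refine ⟨m.fdiv k - x.fdiv k, ?_⟩
  have h1 := Int.mul_fdiv_add_fmod m k
  have h2 := Int.mul_fdiv_add_fmod x k
  rw [mul_sub]
  linarith [h1, h2, h]

-- A's running-max loop from a `some` state is foldl max.
theorem pvMaxLoopA_some (l : List Int) (v : Int) :
    pvMaxLoopA l (some v) = some (l.foldl max v) := by
  induction l generalizing v with
  | nil => rfl
  | cons x xs ih =>
      simp only [pvMaxLoopA, List.foldl_cons]
      by_cases h : v < x
      · simp [h, ih, max_eq_right (le_of_lt h)]
      · simp [h, ih, max_eq_left (le_of_not_gt h)]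

theorem foldl_max_mem (l : List Int) (a : Int) : l.foldl max a = a ∨ l.foldl max a ∈ l := by
  induction l generalizing a with
  | nil => left; rfl
  | cons x xs ih =>
      simp only [List.foldl_cons]
      rcases ih (max a x) with h | h
      · rw [h]
        rcases max_choice a x with hm | hm
        · left; exact hm
        · right; rw [hm]; exact List.mem_cons_self
      · right; exact List.mem_cons_of_mem _ h

theorem fmod_foldl_max {k r : Int} (l : List Int) (m : Int) (hm : m.fmod k = r)
    (hl : ∀ x ∈ l, x.fmod k = r) : (l.foldl max m).fmod k = r := by
  rcases foldl_max_mem l m with h | h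
  · rw [h]; exact hm
  · exact hl _ h

-- Closed form for A's accumulation loop (residues all equal ⇒ one floordiv of the total gap).
theorem pvSumLoopA_closed (k mx : Int) (hk : k ≠ 0) (l : List Int) (acc : Int) :
    pvSumLoopA mx (PySem.Int.mod mx k) k l acc =
      if l.all (fun x => PySem.Int.mod x k = PySem.Int.mod mx k)
      then acc + PySem.Int.floordiv ((l.length : Int) * mx - l.sum) k
      else -1 := by
  induction l generalizing acc with
  | nil => simp [pvSumLoopA, PySem.Int.floordiv]
  | cons x xs ih =>
      by_cases h : PySem.Int.mod x k = PySem.Int.mod mx k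
      · simp only [pvSumLoopA, h, ne_eq, not_true_eq_false, if_false, ih, List.all_cons,
          decide_true, Bool.true_and, List.length_cons, List.sum_cons]
        by_cases hall : xs.all (fun x => decide (PySem.Int.mod x k = PySem.Int.mod mx k)) = true
        · simp only [hall, if_true]
          obtain ⟨q, hq⟩ : k ∣ (mx - x) := dvd_sub_of_fmod_eq h
          have h1 : ((xs.length : Int) + 1) * mx - (x + xs.sum)
              = ((xs.length : Int) * mx - xs.sum) + k * q := by rw [← hq]; ring
          have h2 : PySem.Int.floordiv (((xs.length : Int) + 1) * mx - (x + xs.sum)) k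
              = PySem.Int.floordiv ((xs.length : Int) * mx - xs.sum) k + q := by
            simp only [PySem.Int.floordiv, h1]
            exact Int.add_mul_fdiv_left _ q hk
          have h3 : PySem.Int.floordiv (mx - x) k = q := by
            simp only [PySem.Int.floordiv, hq, Int.mul_fdiv_cancel_left _ hk]
          push_cast
          rw [h3, h2]
          ring
        · simp [hall]
      · simp [pvSumLoopA, h]

-- Closed form for B's streaming loop.
theorem pvLoopB_closed (k r : Int) (hk : k ≠ 0) (l : List Int) (m total seen : Int)
    (hm : m.fmod k = r) :
    pvLoopB r k l m total seen =
      if l.all (fun x => PySem.Int.mod x k = r)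
      then total + seen * PySem.Int.floordiv ((l.foldl max m) - m) k
           + PySem.Int.floordiv ((l.length : Int) * (l.foldl max m) - l.sum) k
      else -1 := by
  induction l generalizing m total seen with
  | nil => simp [pvLoopB, PySem.Int.floordiv]
  | cons x xs ih =>
      by_cases h : PySem.Int.mod x k = r
      · have hx : x.fmod k = r := h
        by_cases hall : xs.all (fun y => decide (PySem.Int.mod y k = r)) = true
        · have hresid : ∀ y ∈ xs, y.fmod k = r := by
            intro y hy
            have := List.all_eq_true.mp hall y hy
            simpa using this
          by_cases hlt : m < x
          · -- new max x
            have hM : (xs.foldl max x).fmod k = r := fmod_foldl_max xs x hx hresid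
            obtain ⟨a, ha⟩ : k ∣ (x - m) := dvd_sub_of_fmod_eq (hm.trans hx.symm)
            obtain ⟨b, hb⟩ : k ∣ ((xs.foldl max x) - x) := dvd_sub_of_fmod_eq (hx.trans hM.symm)
            simp only [pvLoopB, h, ne_eq, not_true_eq_false, if_false, hlt, if_true,
              ih _ _ _ hx, hall, if_true, List.all_cons, decide_true, Bool.true_and,
              List.foldl_cons, List.length_cons, List.sum_cons]
            rw [max_eq_right (le_of_lt hlt)]
            have hMm : (xs.foldl max x) - m = k * (a + b) := by
              have : (xs.foldl max x) - m = (x - m) + ((xs.foldl max x) - x) := by ring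
              rw [this, ha, hb]; ring
            have e1 : PySem.Int.floordiv (x - m) k = a := by
              simp only [PySem.Int.floordiv, ha, Int.mul_fdiv_cancel_left _ hk]
            have e2 : PySem.Int.floordiv ((xs.foldl max x) - x) k = b := by
              simp only [PySem.Int.floordiv, hb, Int.mul_fdiv_cancel_left _ hk]
            have e3 : PySem.Int.floordiv ((xs.foldl max x) - m) k = a + b := by
              simp only [PySem.Int.floordiv, hMm, Int.mul_fdiv_cancel_left _ hk]
            have e4 : PySem.Int.floordiv (((xs.length : Int) + 1) * (xs.foldl max x) - (x + xs.sum)) k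
                = PySem.Int.floordiv ((xs.length : Int) * (xs.foldl max x) - xs.sum) k + b := by
              have hrw : ((xs.length : Int) + 1) * (xs.foldl max x) - (x + xs.sum)
                  = ((xs.length : Int) * (xs.foldl max x) - xs.sum) + k * b := by
                rw [← hb]; ring
              simp only [PySem.Int.floordiv, hrw]
              exact Int.add_mul_fdiv_left _ b hk
            push_cast
            rw [e1, e2, e3, e4]
            ring
          · -- x is not a new max
            have hM : (xs.foldl max m).fmod k = r := fmod_foldl_max xs m hm hresid
            obtain ⟨a, ha⟩ : k ∣ (m - x) := dvd_sub_of_fmod_eq (hx.trans hm.symm)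
            obtain ⟨b, hb⟩ : k ∣ ((xs.foldl max m) - m) := dvd_sub_of_fmod_eq (hm.trans hM.symm)
            simp only [pvLoopB, h, ne_eq, not_true_eq_false, if_false, hlt, if_false,
              ih _ _ _ hm, hall, if_true, List.all_cons, decide_true, Bool.true_and,
              List.foldl_cons, List.length_cons, List.sum_cons]
            rw [max_eq_left (le_of_not_gt hlt)]
            have e1 : PySem.Int.floordiv (m - x) k = a := by
              simp only [PySem.Int.floordiv, ha, Int.mul_fdiv_cancel_left _ hk]
            have e3 : PySem.Int.floordiv ((xs.foldl max m) - m) k = b := by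
              simp only [PySem.Int.floordiv, hb, Int.mul_fdiv_cancel_left _ hk]
            have e4 : PySem.Int.floordiv (((xs.length : Int) + 1) * (xs.foldl max m) - (x + xs.sum)) k
                = PySem.Int.floordiv ((xs.length : Int) * (xs.foldl max m) - xs.sum) k + (a + b) := by
              have hrw : ((xs.length : Int) + 1) * (xs.foldl max m) - (x + xs.sum)
                  = ((xs.length : Int) * (xs.foldl max m) - xs.sum) + k * (a + b) := by
                have hMx : (xs.foldl max m) - x = (m - x) + ((xs.foldl max m) - m) := by ring
                have : (xs.foldl max m) - x = k * (a + b) := by rw [hMx, ha, hb]; ring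
                linarith [this]
              simp only [PySem.Int.floordiv, hrw]
              exact Int.add_mul_fdiv_left _ (a + b) hk
            push_cast
            rw [e1, e3, e4]
            ring
        · -- some later element has the wrong residue: both branches reach -1
          by_cases hlt : m < x
          · simp only [pvLoopB, h, ne_eq, not_true_eq_false, if_false, hlt, if_true,
              ih _ _ _ hx, hall, if_false, List.all_cons, decide_true, Bool.true_and]
            simp
          · simp only [pvLoopB, h, ne_eq, not_true_eq_false, if_false, hlt, if_false,
              ih _ _ _ hm, hall, if_false, List.all_cons, decide_true, Bool.true_and]
            simp
      · simp [pvLoopB, h]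

-- ===== VERDICT (by name: the statement is the Claim_ definition above) =====
theorem minimum_increment_spec : Claim_equal_minimum_increment := by
  intro numbers k _ hk
  unfold Spec_minimum_increment minimum_increment minimum_increment_alt
  cases numbers with
  | nil => rfl
  | cons h t =>
      have hA : pvMaxLoopA (h :: t) none = some (t.foldl max h) := by
        simp [pvMaxLoopA, pvMaxLoopA_some]
      rw [hA]
      dsimp only
      have hMfold : (h :: t).foldl max h = t.foldl max h := by
        simp [List.foldl_cons]
      rw [pvSumLoopA_closed k (t.foldl max h) hk (h :: t) 0,
          pvLoopB_closed k (PySem.Int.mod h k) hk (h :: t) h 0 0 rfl, hMfold]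
      -- the two residue tests agree: the max equals h or is an element of the list
      have hMmem : t.foldl max h = h ∨ t.foldl max h ∈ (h :: t) := by
        rcases foldl_max_mem t h with hc | hc
        · left; exact hc
        · right; exact List.mem_cons_of_mem _ hc
      have hiff : (∀ x ∈ h :: t, x.fmod k = (t.foldl max h).fmod k) ↔
          (∀ x ∈ h :: t, x.fmod k = h.fmod k) := by
        constructor
        · intro H x hx
          rw [H x hx, ← H h List.mem_cons_self]
        · intro H x hx
          have hMr : (t.foldl max h).fmod k = h.fmod k := by
            rcases hMmem with hc | hc
            · rw [hc]
            · exact H _ hc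
          rw [H x hx, hMr]
      have hcond : ((h :: t).all fun x => decide (PySem.Int.mod x k = PySem.Int.mod (t.foldl max h) k))
          = ((h :: t).all fun x => decide (PySem.Int.mod x k = PySem.Int.mod h k)) := by
        by_cases H : ∀ x ∈ h :: t, x.fmod k = h.fmod k
        · have c1 : ((h :: t).all fun x => decide (PySem.Int.mod x k = PySem.Int.mod (t.foldl max h) k)) = true := by
            simp only [List.all_eq_true, decide_eq_true_eq]
            exact hiff.mpr H
          have c2 : ((h :: t).all fun x => decide (PySem.Int.mod x k = PySem.Int.mod h k)) = true := by
            simp only [List.all_eq_true, decide_eq_true_eq]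
            exact H
          rw [c1, c2]
        · have c1 : ((h :: t).all fun x => decide (PySem.Int.mod x k = PySem.Int.mod (t.foldl max h) k)) = false := by
            rw [Bool.eq_false_iff]
            intro hc
            exact H (hiff.mp (by simpa using List.all_eq_true.mp hc))
          have c2 : ((h :: t).all fun x => decide (PySem.Int.mod x k = PySem.Int.mod h k)) = false := by
            rw [Bool.eq_false_iff]
            intro hc
            exact H (by simpa using List.all_eq_true.mp hc)
          rw [c1, c2]
      rw [hcond]
      by_cases hc : ((h :: t).all fun x => decide (PySem.Int.mod x k = PySem.Int.mod h k)) = true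
      · simp only [hc, if_true]; ring
      · simp only [Bool.eq_false_iff.mpr (fun h2 => hc h2)]
        rfl
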